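-- pv_equiv track=rewrite | github.com/DATEXIS/vllm_diagnose_prediction | UI/app.py | _category_map_from_pairs
-- ===== SOURCE A (Python) =====
-- from collections import defaultdict
--
-- def _category_map_from_pairs(pairs: list[tuple[str, str]], digits_only: bool) -> dict[str, str]:
--     """Map 3-character category key -> short description."""
--     buckets: dict[str, list[tuple[str, str]]] = defaultdict(list)
--     for code, desc in pairs:
--         if not code or not desc:
--             continue
--         if digits_only:
--             d = "".join(ch for ch in code if ch.isdigit())
--             if len(d) < 3:
--                 continue
--             k3 = d[:3]
--             buckets[k3].append((d, desc))
--             continue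
--         if not code[0].isalpha() or len(code) < 3:
--             continue
--         k3 = code[:3]
--         buckets[k3].append((code, desc))
--
--     out: dict[str, str] = {}
--     for k3, cands in buckets.items():
--         end9 = [(c, d) for c, d in cands if c.endswith("9")]
--         pool = end9 if end9 else cands
--         _, best_desc = min(pool, key=lambda x: (len(x[0]), x[0]))
--         out[k3] = best_desc
--     return out
-- ===== SOURCE B (Python) =====
-- def _category_map_from_pairs(pairs: list[tuple[str, str]], digits_only: bool) -> dict[str, str]:
--     """Map 3-character category key -> short description (single streaming pass)."""
--     best: dict[str, tuple[tuple[int, int, str], str]] = {}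
--     for code, desc in pairs:
--         if not code or not desc:
--             continue
--         if digits_only:
--             cand = "".join(ch for ch in code if ch.isdigit())
--             if len(cand) < 3:
--                 continue
--         else:
--             if not code[0].isalpha() or len(code) < 3:
--                 continue
--             cand = code
--         k3 = cand[:3]
--         p = (0 if cand.endswith("9") else 1, len(cand), cand)
--         cur = best.get(k3)
--         if cur is None or p < cur[0]:
--             best[k3] = (p, desc)
--     return {k3: pd[1] for k3, pd in best.items()}
-- ===== Notes on version B (the rewrite author's own statement) =====
-- stated objective: simpler
-- what changed: Replaced the group-into-buckets-then-reduce structure (defaultdict of candidate lists followed by a per-bucket filter/min pass) by a single streaming pass keeping one running best (priority, desc) per 3-char key, with priority (endswith-9 flag, length, code) and strict-less-than replacement so first-seen wins on ties.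
import Mathlib
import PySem

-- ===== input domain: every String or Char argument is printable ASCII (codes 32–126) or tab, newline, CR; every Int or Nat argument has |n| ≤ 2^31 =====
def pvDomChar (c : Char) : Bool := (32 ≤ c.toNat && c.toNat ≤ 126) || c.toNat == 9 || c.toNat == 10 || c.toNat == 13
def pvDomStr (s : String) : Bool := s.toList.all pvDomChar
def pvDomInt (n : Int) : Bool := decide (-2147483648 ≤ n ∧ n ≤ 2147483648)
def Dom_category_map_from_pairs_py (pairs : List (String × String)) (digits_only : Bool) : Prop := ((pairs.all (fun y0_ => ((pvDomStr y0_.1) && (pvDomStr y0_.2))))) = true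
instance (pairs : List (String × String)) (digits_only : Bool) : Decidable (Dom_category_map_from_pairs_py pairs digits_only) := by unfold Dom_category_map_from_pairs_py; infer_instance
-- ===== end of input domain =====

-- B replaces A's group-then-reduce (buckets of candidates, then per-bucket filter+min) by one
-- streaming pass keeping a single running best (priority, desc) per key; objective: simpler.

-- ===== PORT A =====
def category_map_from_pairs_py (pairs : List (String × String)) (digits_only : Bool) : List (String × String) :=
  let buckets : PySem.Dict String (List (String × String)) :=
    pairs.foldl (fun b cd =>
      let code := cd.1
      let desc := cd.2
      if code = "" ∨ desc = "" then b
      else if digits_only then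
        let d := String.ofList (code.toList.filter PySem.Chars.isdigit)
        if d.toList.length < 3 then b
        else
          let k3 := String.ofList (PySem.List.slice d.toList none (some 3))
          b.modify k3 [] (fun l => l ++ [(d, desc)])
      else
        if !(match code.toList with | [] => false | c :: _ => PySem.Chars.isalpha c)
            ∨ code.toList.length < 3 then b
        else
          let k3 := String.ofList (PySem.List.slice code.toList none (some 3))
          b.modify k3 [] (fun l => l ++ [(code, desc)])) PySem.Dict.empty
  let out : PySem.Dict String String :=
    buckets.items.foldl (fun o (kc : String × List (String × String)) =>
      let end9 := kc.2.filter (fun x => PySem.Chars.endswith x.1.toList ['9'])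
      let pool := if end9 = [] then kc.2 else end9
      match PySem.List.min2? pool (fun x => x.1.toList.length) (fun x => x.1) with
      | some m => o.insert kc.1 m.2
      | none => o) PySem.Dict.empty
  out.items

-- ===== PORT B =====
-- Python tuple < on (int, int, str), exact lexicographic compare
def pvPrioLt (p q : Nat × Nat × String) : Bool :=
  decide (p.1 < q.1) ||
    (decide (p.1 = q.1) &&
      (decide (p.2.1 < q.2.1) || (decide (p.2.1 = q.2.1) && decide (p.2.2 < q.2.2))))

def category_map_from_pairs_py_alt (pairs : List (String × String)) (digits_only : Bool) : List (String × String) :=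
  let best : PySem.Dict String ((Nat × Nat × String) × String) :=
    pairs.foldl (fun m cd =>
      let code := cd.1
      let desc := cd.2
      if code = "" ∨ desc = "" then m
      else
        let cand? : Option String :=
          if digits_only then
            let c := String.ofList (code.toList.filter PySem.Chars.isdigit)
            if c.toList.length < 3 then none else some c
          else
            if !(match code.toList with | [] => false | c :: _ => PySem.Chars.isalpha c)
                ∨ code.toList.length < 3 then none
            else some code
        match cand? with
        | none => m
        | some cand =>
          let k3 := String.ofList (PySem.List.slice cand.toList none (some 3))
          let p : Nat × Nat × String :=
            (if PySem.Chars.endswith cand.toList ['9'] then 0 else 1, cand.toList.length, cand)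
          match m.get? k3 with
          | none => m.insert k3 (p, desc)
          | some cur => if pvPrioLt p cur.1 then m.insert k3 (p, desc) else m) PySem.Dict.empty
  best.items.map (fun kv => (kv.1, kv.2.2))

-- ===== PRECONDITION & SPEC =====
def Spec_category_map_from_pairs_py (pairs : List (String × String)) (digits_only : Bool) (out : List (String × String)) : Prop := out = category_map_from_pairs_py_alt pairs digits_only
instance (pairs : List (String × String)) (digits_only : Bool) (out : List (String × String)) : Decidable (Spec_category_map_from_pairs_py pairs digits_only out) := by unfold Spec_category_map_from_pairs_py; infer_instance

-- ===== CLAIM (what is proved, stated in full; the proofs are below) =====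
def Claim_equal_category_map_from_pairs_py : Prop := ∀ (pairs : List (String × String)) (digits_only : Bool), Dom_category_map_from_pairs_py pairs digits_only → Spec_category_map_from_pairs_py pairs digits_only (category_map_from_pairs_py pairs digits_only)

-- ===== LEMMAS AND PROOFS =====

-- The shared guard/candidate computation: `none` = the pair is skipped, `some (cand, desc)` otherwise.
def pvEntry (digits_only : Bool) (cd : String × String) : Option (String × String) :=
  if cd.1 = "" ∨ cd.2 = "" then none
  else if digits_only then
    let d := String.ofList (cd.1.toList.filter PySem.Chars.isdigit)
    if d.toList.length < 3 then none else some (d, cd.2)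
  else
    if !(match cd.1.toList with | [] => false | c :: _ => PySem.Chars.isalpha c)
        ∨ cd.1.toList.length < 3 then none
    else some (cd.1, cd.2)

def pvKey (c : String) : String := String.ofList (PySem.List.slice c.toList none (some 3))

def pvPrio (c : String) : Nat × Nat × String :=
  (if PySem.Chars.endswith c.toList ['9'] then 0 else 1, c.toList.length, c)

-- generic "first strict minimum" fold (Python min/first-wins shape)
def pvMinStep {α : Type} (lt : α → α → Bool) (acc : Option α) (x : α) : Option α :=
  match acc with
  | none => some x
  | some m => if lt x m then some x else some m

def pvMinFold {α : Type} (lt : α → α → Bool) (l : List α) : Option α :=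
  l.foldl (pvMinStep lt) none

-- the two strict comparisons used by the two programs
def pvLtA (x y : String × String) : Bool :=
  decide (x.1.toList.length < y.1.toList.length) ||
    (!decide (y.1.toList.length < x.1.toList.length) && decide (x.1 < y.1))

def pvLtC (x y : String × String) : Bool := pvPrioLt (pvPrio x.1) (pvPrio y.1)

-- "m is the first element of l minimal for lt"
def pvFirstMin {α : Type} (lt : α → α → Bool) (l : List α) (m : α) : Prop :=
  ∃ l1 l2, l = l1 ++ m :: l2 ∧ (∀ y ∈ l1, lt m y = true) ∧ (∀ y ∈ l2, lt y m = false)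

theorem pvFirstMin_cons {α : Type} (lt : α → α → Bool) (x : α) (t : List α) (m : α) :
    pvFirstMin lt (x :: t) m ↔
      (m = x ∧ ∀ y ∈ t, lt y x = false) ∨ (lt m x = true ∧ pvFirstMin lt t m) := by
  constructor
  · rintro ⟨l1, l2, heq, h1, h2⟩
    cases l1 with
    | nil =>
      simp only [List.nil_append, List.cons.injEq] at heq
      refine Or.inl ⟨heq.1.symm, ?_⟩
      intro y hy
      rw [heq.1]
      exact h2 y (heq.2 ▸ hy)
    | cons a l1' =>
      simp only [List.cons_append, List.cons.injEq] at heq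
      refine Or.inr ⟨?_, l1', l2, heq.2, fun y hy => h1 y (List.mem_cons_of_mem a hy), h2⟩
      have := h1 a (List.mem_cons_self)
      rwa [← heq.1] at this
  · rintro (⟨rfl, h⟩ | ⟨hlt, l1, l2, heq, h1, h2⟩)
    · exact ⟨[], t, rfl, by simp, h⟩
    · refine ⟨x :: l1, l2, by rw [heq]; rfl, ?_, h2⟩
      intro y hy
      rcases List.mem_cons.1 hy with rfl | hy
      · exact hlt
      · exact h1 y hy

theorem pvFirstMin_mem {α : Type} {lt : α → α → Bool} {l : List α} {m : α}
    (h : pvFirstMin lt l m) : m ∈ l := by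
  obtain ⟨l1, l2, heq, -, -⟩ := h
  rw [heq]; simp

theorem pvFirstMin_unique {α : Type} {lt : α → α → Bool} {l : List α} {m m' : α}
    (h : pvFirstMin lt l m) (h' : pvFirstMin lt l m') : m = m' := by
  induction l with
  | nil => obtain ⟨l1, l2, heq, -, -⟩ := h; exact absurd heq (by simp)
  | cons x t ih =>
    rw [pvFirstMin_cons] at h h'
    rcases h with ⟨rfl, hall⟩ | ⟨hlt, hfm⟩ <;> rcases h' with ⟨rfl, hall'⟩ | ⟨hlt', hfm'⟩
    · rfl
    · exact absurd hlt' (by simp [hall m' (pvFirstMin_mem hfm')])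
    · exact absurd hlt (by simp [hall' m (pvFirstMin_mem hfm)])
    · exact ih hfm hfm'

theorem pvMinFold_some_aux {α : Type} (lt : α → α → Bool) (l : List α) :
    ∀ m : α, ∃ r, l.foldl (pvMinStep lt) (some m) = some r := by
  induction l with
  | nil => exact fun m => ⟨m, rfl⟩
  | cons x t ih =>
    intro m
    simp only [List.foldl_cons, pvMinStep]
    split
    · exact ih x
    · exact ih m

theorem pvMinFold_eq_none_iff {α : Type} (lt : α → α → Bool) (l : List α) :
    pvMinFold lt l = none ↔ l = [] := by
  cases l with
  | nil => simp [pvMinFold]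
  | cons x t =>
    simp only [pvMinFold, List.foldl_cons, pvMinStep]
    obtain ⟨r, hr⟩ := pvMinFold_some_aux lt t x
    simp [hr]

theorem pvMinFold_firstMin {α : Type} (lt : α → α → Bool)
    (htrans : ∀ a b c, lt a b = true → lt b c = true → lt a c = true)
    (htot : ∀ a b c, lt a b = true → lt c b = false → lt a c = true)
    (l : List α) (m : α) (h : pvMinFold lt l = some m) : pvFirstMin lt l m := by
  induction l using List.reverseRecOn generalizing m with
  | nil => simp [pvMinFold] at h
  | append_singleton l e ih =>
    rw [pvMinFold, List.foldl_append] at h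
    cases hml : pvMinFold lt l with
    | none =>
      rw [(pvMinFold_eq_none_iff lt l).1 hml] at h ⊢
      simp only [pvMinFold, List.foldl_nil, List.foldl_cons, pvMinStep] at h
      obtain rfl : e = m := by simpa using h
      exact ⟨[], [], rfl, by simp, by simp⟩
    | some m0 =>
      rw [pvMinFold] at hml
      rw [hml] at h
      simp only [List.foldl_cons, List.foldl_nil, pvMinStep] at h
      obtain ⟨a, b, heq, h1, h2⟩ := ih m0 hml
      by_cases hlt : lt e m0 = true
      · rw [if_pos hlt] at h
        obtain rfl : e = m := by simpa using h
        refine ⟨l, [], by simp, ?_, by simp⟩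
        intro y hy
        rw [heq] at hy
        rcases List.mem_append.1 hy with hy | hy
        · exact htrans e m0 y hlt (h1 y hy)
        · rcases List.mem_cons.1 hy with rfl | hy
          · exact hlt
          · exact htot e m0 y hlt (h2 y hy)
      · rw [if_neg hlt] at h
        obtain rfl : m0 = m := by simpa using h
        refine ⟨a, b ++ [e], by rw [heq]; simp, h1, ?_⟩
        intro y hy
        rcases List.mem_append.1 hy with hy | hy
        · exact h2 y hy
        · rcases List.mem_singleton.1 hy with rfl
          simpa using hlt


-- predicate "candidate ends with 9"
def pvP (x : String × String) : Bool := PySem.Chars.endswith x.1.toList ['9']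

def pvSelA (cands : List (String × String)) : String :=
  let end9 := cands.filter (fun x => PySem.Chars.endswith x.1.toList ['9'])
  let pool := if end9 = [] then cands else end9
  match PySem.List.min2? pool (fun x => x.1.toList.length) (fun x => x.1) with
  | some m => m.2
  | none => ""

def pvScalStep (s : Option ((Nat × Nat × String) × String)) (e : String × String) :
    Option ((Nat × Nat × String) × String) :=
  match s with
  | none => some (pvPrio e.1, e.2)
  | some cur => if pvPrioLt (pvPrio e.1) cur.1 then some (pvPrio e.1, e.2) else some cur

def pvDflt : (Nat × Nat × String) × String := ((0, 0, ""), "")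

def pvDStep (m : PySem.Dict String ((Nat × Nat × String) × String)) (e : String × String) :
    PySem.Dict String ((Nat × Nat × String) × String) :=
  match m.get? (pvKey e.1) with
  | none => m.insert (pvKey e.1) (pvPrio e.1, e.2)
  | some cur => if pvPrioLt (pvPrio e.1) cur.1 then m.insert (pvKey e.1) (pvPrio e.1, e.2) else m

-- ---- order facts ----
theorem pvLtA_true_iff (x y : String × String) :
    pvLtA x y = true ↔
      (x.1.toList.length < y.1.toList.length ∨
        (x.1.toList.length = y.1.toList.length ∧ x.1 < y.1)) := by
  simp only [pvLtA, Bool.or_eq_true, Bool.and_eq_true, decide_eq_true_eq,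
    Bool.not_eq_true', decide_eq_false_iff_not]
  constructor
  · rintro (h | ⟨h1, h2⟩)
    · exact Or.inl h
    · by_cases hlt : x.1.toList.length < y.1.toList.length
      · exact Or.inl hlt
      · exact Or.inr ⟨by omega, h2⟩
  · rintro (h | ⟨h1, h2⟩)
    · exact Or.inl h
    · exact Or.inr ⟨by omega, h2⟩

theorem pvPrioLt_true_iff (p q : Nat × Nat × String) :
    pvPrioLt p q = true ↔
      (p.1 < q.1 ∨ (p.1 = q.1 ∧ (p.2.1 < q.2.1 ∨ (p.2.1 = q.2.1 ∧ p.2.2 < q.2.2)))) := by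
  simp [pvPrioLt]

theorem pvLtA_trans : ∀ a b c, pvLtA a b = true → pvLtA b c = true → pvLtA a c = true := by
  intro a b c h1 h2
  rw [pvLtA_true_iff] at h1 h2 ⊢
  rcases h1 with h1 | ⟨e1, s1⟩ <;> rcases h2 with h2 | ⟨e2, s2⟩
  · exact Or.inl (by omega)
  · exact Or.inl (by omega)
  · exact Or.inl (by omega)
  · exact Or.inr ⟨by omega, lt_trans s1 s2⟩

theorem pvLtA_tot : ∀ a b c, pvLtA a b = true → pvLtA c b = false → pvLtA a c = true := by
  intro a b c h1 h2
  rw [pvLtA_true_iff] at h1 ⊢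
  have h2' : ¬ (c.1.toList.length < b.1.toList.length ∨
      (c.1.toList.length = b.1.toList.length ∧ c.1 < b.1)) := by
    rw [← pvLtA_true_iff]; simp [h2]
  push_neg at h2'
  obtain ⟨hn1, hn2⟩ := h2'
  rcases h1 with h1 | ⟨e1, s1⟩
  · exact Or.inl (by omega)
  · by_cases hlc : c.1.toList.length = b.1.toList.length
    · exact Or.inr ⟨by omega, lt_of_lt_of_le s1 (not_lt.mp (hn2 hlc))⟩
    · exact Or.inl (by omega)

theorem pvLtC_trans : ∀ a b c, pvLtC a b = true → pvLtC b c = true → pvLtC a c = true := by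
  intro a b c h1 h2
  unfold pvLtC at h1 h2 ⊢
  rw [pvPrioLt_true_iff] at h1 h2 ⊢
  rcases h1 with h1 | ⟨ef1, h1 | ⟨el1, hs1⟩⟩ <;> rcases h2 with h2 | ⟨ef2, h2 | ⟨el2, hs2⟩⟩
  · exact Or.inl (by omega)
  · exact Or.inl (by omega)
  · exact Or.inl (by omega)
  · exact Or.inl (by omega)
  · exact Or.inr ⟨by omega, Or.inl (by omega)⟩
  · exact Or.inr ⟨by omega, Or.inl (by omega)⟩
  · exact Or.inl (by omega)
  · exact Or.inr ⟨by omega, Or.inl (by omega)⟩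
  · exact Or.inr ⟨by omega, Or.inr ⟨by omega, lt_trans hs1 hs2⟩⟩

theorem pvLtC_tot : ∀ a b c, pvLtC a b = true → pvLtC c b = false → pvLtC a c = true := by
  intro a b c h1 h2
  unfold pvLtC at h1 h2 ⊢
  rw [pvPrioLt_true_iff] at h1 ⊢
  have h2' : ¬ ((pvPrio c.1).1 < (pvPrio b.1).1 ∨
      ((pvPrio c.1).1 = (pvPrio b.1).1 ∧ ((pvPrio c.1).2.1 < (pvPrio b.1).2.1 ∨
        ((pvPrio c.1).2.1 = (pvPrio b.1).2.1 ∧ (pvPrio c.1).2.2 < (pvPrio b.1).2.2)))) := by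
    rw [← pvPrioLt_true_iff]; simp [h2]
  push_neg at h2'
  obtain ⟨hf, hrest⟩ := h2'
  rcases h1 with h1 | ⟨ef1, hin⟩
  · exact Or.inl (by omega)
  · by_cases hfc : (pvPrio c.1).1 = (pvPrio b.1).1
    · obtain ⟨hl, hls⟩ := hrest hfc
      rcases hin with h1 | ⟨el1, hs1⟩
      · exact Or.inr ⟨by omega, Or.inl (by omega)⟩
      · by_cases hlc : (pvPrio c.1).2.1 = (pvPrio b.1).2.1
        · exact Or.inr ⟨by omega, Or.inr ⟨by omega, lt_of_lt_of_le hs1 (not_lt.mp (hls hlc))⟩⟩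
        · exact Or.inr ⟨by omega, Or.inl (by omega)⟩
    · exact Or.inl (by omega)

-- flag facts
theorem pvFlag_eq_ltC (x y : String × String) (hxy : pvP x = pvP y) :
    pvLtC x y = pvLtA x y := by
  rw [Bool.eq_iff_iff, pvLtA_true_iff]
  unfold pvLtC
  rw [pvPrioLt_true_iff]
  simp only [pvPrio, pvP] at hxy ⊢
  rw [hxy]
  constructor
  · rintro (h | ⟨-, h⟩)
    · split at h <;> omega
    · exact h
  · intro h
    exact Or.inr ⟨rfl, h⟩

theorem pvLtC_of_flags (x y : String × String) (hx : pvP x = true) (hy : pvP y = false) :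
    pvLtC x y = true := by
  unfold pvLtC
  rw [pvPrioLt_true_iff]
  simp only [pvPrio, pvP] at hx hy ⊢
  rw [hx, hy]
  exact Or.inl (by simp)

theorem pvLtC_of_flags' (x y : String × String) (hx : pvP x = false) (hy : pvP y = true) :
    pvLtC x y = false := by
  unfold pvLtC
  rw [← Bool.not_eq_true, pvPrioLt_true_iff]
  simp only [pvPrio, pvP] at hx hy ⊢
  rw [hx, hy]
  simp

theorem pvFirstMin_congr {α : Type} {lt lt' : α → α → Bool} {l : List α} {m : α}
    (hc : ∀ a ∈ l, ∀ b ∈ l, lt a b = lt' a b) (h : pvFirstMin lt l m) :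
    pvFirstMin lt' l m := by
  obtain ⟨l1, l2, heq, h1, h2⟩ := h
  have hm : m ∈ l := by rw [heq]; simp
  refine ⟨l1, l2, heq, ?_, ?_⟩
  · intro y hy
    have hyl : y ∈ l := by rw [heq]; simp [hy]
    rw [← hc m hm y hyl]; exact h1 y hy
  · intro y hy
    have hyl : y ∈ l := by rw [heq]; simp [hy]
    rw [← hc y hyl m hm]; exact h2 y hy

-- transfer: a first minimum of the end9-filter for (len, code) is the first
-- minimum of the whole bucket for the combined (flag, len, code) order
theorem pvTransfer_filter : ∀ (l : List (String × String)) (m : String × String),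
    pvFirstMin pvLtA (l.filter pvP) m → pvFirstMin pvLtC l m := by
  intro l
  induction l with
  | nil => intro m h; obtain ⟨l1, l2, heq, -, -⟩ := h; simp at heq
  | cons x t ih =>
    intro m h
    by_cases hp : pvP x = true
    · rw [List.filter_cons_of_pos hp, pvFirstMin_cons] at h
      rw [pvFirstMin_cons]
      rcases h with ⟨rfl, hall⟩ | ⟨hlt, hfm⟩
      · refine Or.inl ⟨rfl, ?_⟩
        intro y hy
        by_cases hpy : pvP y = true
        · rw [pvFlag_eq_ltC y m (by rw [hpy, hp])]
          exact hall y (List.mem_filter.2 ⟨hy, hpy⟩)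
        · exact pvLtC_of_flags' y m (by simpa using hpy) hp
      · have hm : pvP m = true :=
          (List.mem_filter.1 (pvFirstMin_mem hfm)).2
        refine Or.inr ⟨?_, ih m hfm⟩
        rw [pvFlag_eq_ltC m x (by rw [hm, hp])]
        exact hlt
    · rw [List.filter_cons_of_neg hp] at h
      have hm : pvP m = true :=
        (List.mem_filter.1 (pvFirstMin_mem h)).2
      rw [pvFirstMin_cons]
      exact Or.inr ⟨pvLtC_of_flags m x hm (by simpa using hp), ih m h⟩

theorem pvScalFold_eq_aux : ∀ (l : List (String × String)) (m : String × String),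
    l.foldl pvScalStep (some (pvPrio m.1, m.2))
      = (l.foldl (pvMinStep pvLtC) (some m)).map (fun e => (pvPrio e.1, e.2)) := by
  intro l
  induction l with
  | nil => intro m; rfl
  | cons x t ih =>
    intro m
    simp only [List.foldl_cons, pvScalStep, pvMinStep, pvLtC]
    by_cases h : pvPrioLt (pvPrio x.1) (pvPrio m.1) = true
    · rw [if_pos h, if_pos h]
      exact ih x
    · rw [if_neg h, if_neg h]
      exact ih m

theorem pvScalFold_eq (l : List (String × String)) :
    l.foldl pvScalStep none = (pvMinFold pvLtC l).map (fun e => (pvPrio e.1, e.2)) := by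
  cases l with
  | nil => rfl
  | cons x t =>
    rw [pvMinFold, List.foldl_cons, List.foldl_cons]
    simp only [pvScalStep, pvMinStep]
    exact pvScalFold_eq_aux t x

-- per-bucket agreement: A's filter/min selection = B's running-best fold
theorem pvPerKey (l : List (String × String)) (hne : l ≠ []) :
    pvSelA l = ((l.foldl pvScalStep none).getD pvDflt).2 := by
  have hpool : (if l.filter pvP = [] then l else l.filter pvP) ≠ [] := by
    split <;> simp_all
  have hmin2 : PySem.List.min2? (if l.filter pvP = [] then l else l.filter pvP)
      (fun x : String × String => x.1.toList.length) (fun x => x.1)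
      = pvMinFold pvLtA (if l.filter pvP = [] then l else l.filter pvP) := by
    unfold PySem.List.min2? pvMinFold
    refine List.foldl_ext _ _ _ ?_
    intro acc y hy
    cases acc <;> rfl
  cases hA : pvMinFold pvLtA (if l.filter pvP = [] then l else l.filter pvP) with
  | none => exact absurd ((pvMinFold_eq_none_iff _ _).1 hA) hpool
  | some mA =>
    have hfmA : pvFirstMin pvLtA (if l.filter pvP = [] then l else l.filter pvP) mA :=
      pvMinFold_firstMin pvLtA pvLtA_trans pvLtA_tot _ mA hA
    have hfmC : pvFirstMin pvLtC l mA := by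
      by_cases hf : l.filter pvP = []
      · rw [hf] at hfmA
        simp only [if_pos rfl] at hfmA
        refine pvFirstMin_congr ?_ hfmA
        intro a ha b hb
        have hpa : pvP a = false := by
          have := List.filter_eq_nil_iff.1 hf a ha; simpa using this
        have hpb : pvP b = false := by
          have := List.filter_eq_nil_iff.1 hf b hb; simpa using this
        exact (pvFlag_eq_ltC a b (by rw [hpa, hpb])).symm
      · rw [if_neg hf] at hfmA
        exact pvTransfer_filter l mA hfmA
    cases hB : pvMinFold pvLtC l with
    | none => exact absurd ((pvMinFold_eq_none_iff _ _).1 hB) hne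
    | some mB =>
      have hfmB : pvFirstMin pvLtC l mB :=
        pvMinFold_firstMin pvLtC pvLtC_trans pvLtC_tot l mB hB
      have hmm : mA = mB := pvFirstMin_unique hfmC hfmB
      rw [pvScalFold_eq, hB]
      simp only [Option.map_some, Option.getD_some]
      show (match PySem.List.min2? (if l.filter pvP = [] then l else l.filter pvP)
          (fun x : String × String => x.1.toList.length) (fun x => x.1) with
        | some m => m.2
        | none => "") = mB.2
      rw [hmin2, hA, hmm]


theorem pvFoldl_entry {β : Type} (do_ : Bool) (f : β → (String × String) → β) (init : β)
    (pairs : List (String × String)) :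
    pairs.foldl (fun b cd => match pvEntry do_ cd with | none => b | some e => f b e) init
      = (pairs.filterMap (pvEntry do_)).foldl f init := by
  induction pairs generalizing init with
  | nil => rfl
  | cons cd t ih =>
    rw [List.foldl_cons, List.filterMap_cons]
    cases h : pvEntry do_ cd with
    | none => simp only [h]; exact ih init
    | some e => simp only [h, List.foldl_cons]; exact ih (f init e)

theorem pvBucketsA_getD (E : List (String × String)) (k : String) :
    ((E.foldl (fun b e => b.modify (pvKey e.1) [] (fun l => l ++ [e])) PySem.Dict.empty).getD k [])
      = E.filter (fun e => pvKey e.1 == k) := by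
  have h1 : E.foldl (fun b e => b.modify (pvKey e.1) [] (fun l => l ++ [e])) PySem.Dict.empty
      = (E.map (fun e => (pvKey e.1, e))).foldl
          (fun d p => d.modify p.1 [] (fun x => x ++ [p.2])) PySem.Dict.empty := by
    rw [List.foldl_map]
  rw [h1, PySem.Dict.getD_foldl_modify_append]
  simp [List.filter_map, List.map_map, Function.comp_def]

theorem pvBucketsA_keys (E : List (String × String)) :
    (E.foldl (fun b e => b.modify (pvKey e.1) [] (fun l => l ++ [e])) PySem.Dict.empty).keys
      = PySem.Set.ofList (E.map (fun e => pvKey e.1)) := by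
  have h := PySem.Dict.keys_foldl_modify_key E (fun e => pvKey e.1) []
    (fun _ e => fun l => l ++ [e]) PySem.Dict.empty
  rw [PySem.Dict.keys_empty, PySem.Set.update_nil_left] at h
  exact h

theorem pvBucketsA_nodup (E : List (String × String)) :
    (E.foldl (fun b e => b.modify (pvKey e.1) [] (fun l => l ++ [e])) PySem.Dict.empty).keys.Nodup := by
  exact PySem.Dict.nodup_keys_foldl_modify_key E (fun e => pvKey e.1) []
    (fun _ e => fun l => l ++ [e]) PySem.Dict.empty (by rw [PySem.Dict.keys_empty]; exact List.nodup_nil)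

theorem pvBestB_items (l : List (String × String)) :
    (l.foldl pvDStep PySem.Dict.empty).items
      = (PySem.Set.ofList (l.map (fun e' => pvKey e'.1))).map
          (fun k => (k, ((l.filter (fun e' => pvKey e'.1 == k)).foldl pvScalStep none).getD pvDflt)) := by
  induction l using List.reverseRecOn with
  | nil => rfl
  | append_singleton l e ih =>
    rw [List.foldl_append, List.foldl_cons, List.foldl_nil]
    have hnodupK : (PySem.Set.ofList (l.map (fun e' => pvKey e'.1))).Nodup :=
      PySem.Set.nodup_ofList _
    have hkeys : (l.foldl pvDStep PySem.Dict.empty).keys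
        = PySem.Set.ofList (l.map (fun e' => pvKey e'.1)) := by
      simp only [PySem.Dict.keys, ih, List.map_map, Function.comp_def]
      simp
    have hKnew : PySem.Set.ofList ((l ++ [e]).map (fun e' => pvKey e'.1))
        = (PySem.Set.ofList (l.map (fun e' => pvKey e'.1))).add (pvKey e.1) := by
      simp only [List.map_append, List.map_cons, List.map_nil]
      rw [PySem.Set.ofList_append_singleton]
    have hfilter : ∀ k' : String, (l ++ [e]).filter (fun e' => pvKey e'.1 == k')
        = l.filter (fun e' => pvKey e'.1 == k') ++ (if pvKey e.1 == k' then [e] else []) := by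
      intro k'
      rw [List.filter_append]
      simp [List.filter_cons]
    by_cases hk : pvKey e.1 ∈ PySem.Set.ofList (l.map (fun e' => pvKey e'.1))
    · obtain ⟨e0, he0, hke0⟩ : ∃ e0 ∈ l, pvKey e0.1 = pvKey e.1 := by
        have := (PySem.Set.mem_ofList _ _).1 hk
        exact List.mem_map.1 this
      have hfne : l.filter (fun e' => pvKey e'.1 == pvKey e.1) ≠ [] := by
        intro hnil
        have := List.filter_eq_nil_iff.1 hnil e0 he0
        simp [hke0] at this
      obtain ⟨r, hr⟩ : ∃ r, (l.filter (fun e' => pvKey e'.1 == pvKey e.1)).foldl pvScalStep none = some r := by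
        rw [pvScalFold_eq]
        cases hmf : pvMinFold pvLtC (l.filter (fun e' => pvKey e'.1 == pvKey e.1)) with
        | none => exact absurd ((pvMinFold_eq_none_iff _ _).1 hmf) hfne
        | some mm => exact ⟨_, rfl⟩
      have hmem : (pvKey e.1, r) ∈ (l.foldl pvDStep PySem.Dict.empty).items := by
        rw [ih]
        refine List.mem_map.2 ⟨pvKey e.1, hk, ?_⟩
        rw [hr]
        rfl
      have hget : (l.foldl pvDStep PySem.Dict.empty).get? (pvKey e.1) = some r :=
        PySem.Dict.get?_of_mem_items _ hmem (by rw [hkeys]; exact hnodupK)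
      simp only [pvDStep, hget]
      rw [hKnew, PySem.Set.add_of_mem hk]
      by_cases hlt : pvPrioLt (pvPrio e.1) r.1 = true
      · rw [if_pos hlt]
        have hcont : (l.foldl pvDStep PySem.Dict.empty).contains (pvKey e.1) = true :=
          (PySem.Dict.contains_iff_mem_keys _ _).2 (by rw [hkeys]; exact hk)
        rw [PySem.Dict.items_insert_of_contains _ _ hcont, ih, List.map_map]
        refine List.map_congr_left ?_
        intro k' hk'
        simp only [Function.comp_def]
        by_cases hkk : k' = pvKey e.1
        · subst hkk
          rw [hfilter]
          simp only [BEq.rfl, if_pos, beq_self_eq_true, if_true]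
          rw [List.foldl_append, hr, List.foldl_cons, List.foldl_nil]
          simp only [pvScalStep, hlt, if_pos, if_true, Option.getD_some]
        · have hne1 : (k' == pvKey e.1) = false := by simp [hkk]
          have hne2 : (pvKey e.1 == k') = false := by simp [Ne.symm hkk]
          rw [hfilter]
          simp [hne1, hne2]
      · rw [if_neg hlt, ih]
        refine List.map_congr_left ?_
        intro k' hk'
        by_cases hkk : k' = pvKey e.1
        · subst hkk
          rw [hfilter]
          simp only [beq_self_eq_true, if_true]
          rw [List.foldl_append, hr, List.foldl_cons, List.foldl_nil]
          simp [pvScalStep, hlt]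
        · have hne2 : (pvKey e.1 == k') = false := by simp [Ne.symm hkk]
          rw [hfilter]
          simp [hne2]
    · have hget : (l.foldl pvDStep PySem.Dict.empty).get? (pvKey e.1) = none :=
        (PySem.Dict.get?_eq_none_iff_not_mem_keys _ _).2 (by rw [hkeys]; exact hk)
      have hcont : (l.foldl pvDStep PySem.Dict.empty).contains (pvKey e.1) = false := by
        rw [← Bool.not_eq_true, PySem.Dict.contains_iff_mem_keys, hkeys]
        simpa using hk
      simp only [pvDStep, hget]
      rw [PySem.Dict.items_insert_of_not_contains _ _ hcont, ih, hKnew,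
        PySem.Set.add_of_not_mem hk, List.map_append]
      congr 1
      · refine List.map_congr_left ?_
        intro k' hk'
        have hkk : pvKey e.1 ≠ k' := fun h => hk (h ▸ hk')
        have hne2 : (pvKey e.1 == k') = false := by simp [hkk]
        rw [hfilter]
        simp [hne2]
      · have hfe : l.filter (fun e' => pvKey e'.1 == pvKey e.1) = [] := by
          rw [List.filter_eq_nil_iff]
          intro a ha
          simp only [beq_iff_eq]
          intro hpk
          exact hk ((PySem.Set.mem_ofList _ _).2 (List.mem_map.2 ⟨a, ha, hpk⟩))
        simp only [List.map_cons, List.map_nil]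
        rw [hfilter]
        simp [hfe, pvScalStep]

theorem pvMin2_eq (pool : List (String × String)) :
    PySem.List.min2? pool (fun x => x.1.toList.length) (fun x => x.1) = pvMinFold pvLtA pool := by
  unfold PySem.List.min2? pvMinFold
  refine List.foldl_ext _ _ _ ?_
  intro acc y hy
  cases acc <;> rfl

theorem pvA_char (pairs : List (String × String)) (digits_only : Bool) :
    category_map_from_pairs_py pairs digits_only
      = (PySem.Set.ofList ((pairs.filterMap (pvEntry digits_only)).map (fun e' => pvKey e'.1))).map
          (fun k => (k, pvSelA ((pairs.filterMap (pvEntry digits_only)).filter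
            (fun e' => pvKey e'.1 == k)))) := by
  have hb : pairs.foldl (fun b cd =>
      let code := cd.1
      let desc := cd.2
      if code = "" ∨ desc = "" then b
      else if digits_only then
        let d := String.ofList (code.toList.filter PySem.Chars.isdigit)
        if d.toList.length < 3 then b
        else
          let k3 := String.ofList (PySem.List.slice d.toList none (some 3))
          b.modify k3 [] (fun l => l ++ [(d, desc)])
      else
        if !(match code.toList with | [] => false | c :: _ => PySem.Chars.isalpha c)
            ∨ code.toList.length < 3 then b
        else
          let k3 := String.ofList (PySem.List.slice code.toList none (some 3))
          b.modify k3 [] (fun l => l ++ [(code, desc)])) PySem.Dict.empty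
      = (pairs.filterMap (pvEntry digits_only)).foldl
          (fun b e => b.modify (pvKey e.1) [] (fun l => l ++ [e])) PySem.Dict.empty := by
    rw [← pvFoldl_entry]
    refine List.foldl_ext _ _ _ ?_
    intro b cd _
    simp only [pvEntry, pvKey]
    split_ifs <;> rfl
  show (((pairs.foldl _ PySem.Dict.empty : PySem.Dict String (List (String × String))).items.foldl
      (fun o (kc : String × List (String × String)) =>
        let end9 := kc.2.filter (fun x => PySem.Chars.endswith x.1.toList ['9'])
        let pool := if end9 = [] then kc.2 else end9
        match PySem.List.min2? pool (fun x => x.1.toList.length) (fun x => x.1) with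
        | some m => o.insert kc.1 m.2
        | none => o) PySem.Dict.empty).items) = _
  rw [hb]
  have hBitems : ((pairs.filterMap (pvEntry digits_only)).foldl
      (fun b e => b.modify (pvKey e.1) [] (fun l => l ++ [e])) PySem.Dict.empty).items
      = (PySem.Set.ofList ((pairs.filterMap (pvEntry digits_only)).map (fun e' => pvKey e'.1))).map
          (fun k => (k, (pairs.filterMap (pvEntry digits_only)).filter (fun e' => pvKey e'.1 == k))) := by
    rw [PySem.Dict.items_eq_map_keys _ (pvBucketsA_nodup _) [], pvBucketsA_keys]
    refine List.map_congr_left ?_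
    intro k hk
    rw [pvBucketsA_getD]
  have hcne : ∀ kc ∈ ((pairs.filterMap (pvEntry digits_only)).foldl
      (fun b e => b.modify (pvKey e.1) [] (fun l => l ++ [e])) PySem.Dict.empty).items,
      (kc : String × List (String × String)).2 ≠ [] := by
    intro kc hkc
    rw [hBitems] at hkc
    obtain ⟨k, hkK, rfl⟩ := List.mem_map.1 hkc
    obtain ⟨e0, he0, hke0⟩ :=
      List.mem_map.1 ((PySem.Set.mem_ofList _ _).1 hkK)
    intro hnil
    have := List.filter_eq_nil_iff.1 hnil e0 he0
    simp [hke0] at this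
  have hout : ((pairs.filterMap (pvEntry digits_only)).foldl
      (fun b e => b.modify (pvKey e.1) [] (fun l => l ++ [e])) PySem.Dict.empty).items.foldl
      (fun o (kc : String × List (String × String)) =>
        let end9 := kc.2.filter (fun x => PySem.Chars.endswith x.1.toList ['9'])
        let pool := if end9 = [] then kc.2 else end9
        match PySem.List.min2? pool (fun x => x.1.toList.length) (fun x => x.1) with
        | some m => o.insert kc.1 m.2
        | none => o) PySem.Dict.empty
      = ((pairs.filterMap (pvEntry digits_only)).foldl
      (fun b e => b.modify (pvKey e.1) [] (fun l => l ++ [e])) PySem.Dict.empty).items.foldl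
      (fun o (kc : String × List (String × String)) => o.insert kc.1 (pvSelA kc.2))
      PySem.Dict.empty := by
    refine List.foldl_ext _ _ _ ?_
    intro o kc hkc
    have hne := hcne kc hkc
    have hpool : (if kc.2.filter (fun x => PySem.Chars.endswith x.1.toList ['9']) = []
        then kc.2 else kc.2.filter (fun x => PySem.Chars.endswith x.1.toList ['9'])) ≠ [] := by
      split <;> simp_all
    dsimp only
    simp only [pvSelA]
    rw [pvMin2_eq]
    cases hm : pvMinFold pvLtA (if kc.2.filter (fun x => PySem.Chars.endswith x.1.toList ['9']) = []
        then kc.2 else kc.2.filter (fun x => PySem.Chars.endswith x.1.toList ['9'])) with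
    | none => exact absurd ((pvMinFold_eq_none_iff _ _).1 hm) hpool
    | some m => rfl
  rw [hout]
  have hfresh := PySem.Dict.items_foldl_insert_fresh
    ((pairs.filterMap (pvEntry digits_only)).foldl
      (fun b e => b.modify (pvKey e.1) [] (fun l => l ++ [e])) PySem.Dict.empty).items
    (fun a => a.1) (fun a => pvSelA a.2) PySem.Dict.empty
    (fun a _ => by rw [PySem.Dict.contains_empty])
    (by
      have hk := pvBucketsA_keys (pairs.filterMap (pvEntry digits_only))
      have : (((pairs.filterMap (pvEntry digits_only)).foldl
          (fun b e => b.modify (pvKey e.1) [] (fun l => l ++ [e])) PySem.Dict.empty).items.map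
          (fun a => a.1)) = ((pairs.filterMap (pvEntry digits_only)).foldl
          (fun b e => b.modify (pvKey e.1) [] (fun l => l ++ [e])) PySem.Dict.empty).keys := rfl
      rw [this, hk]
      exact PySem.Set.nodup_ofList _)
  rw [hfresh, hBitems, List.map_map]
  simp only [List.nil_append]
  rfl

theorem pvB_char (pairs : List (String × String)) (digits_only : Bool) :
    category_map_from_pairs_py_alt pairs digits_only
      = (PySem.Set.ofList ((pairs.filterMap (pvEntry digits_only)).map (fun e' => pvKey e'.1))).map
          (fun k => (k, ((((pairs.filterMap (pvEntry digits_only)).filter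
            (fun e' => pvKey e'.1 == k)).foldl pvScalStep none).getD pvDflt).2)) := by
  have hb : pairs.foldl (fun m cd =>
      let code := cd.1
      let desc := cd.2
      if code = "" ∨ desc = "" then m
      else
        let cand? : Option String :=
          if digits_only then
            let c := String.ofList (code.toList.filter PySem.Chars.isdigit)
            if c.toList.length < 3 then none else some c
          else
            if !(match code.toList with | [] => false | c :: _ => PySem.Chars.isalpha c)
                ∨ code.toList.length < 3 then none
            else some code
        match cand? with
        | none => m
        | some cand =>
          let k3 := String.ofList (PySem.List.slice cand.toList none (some 3))
          let p : Nat × Nat × String :=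
            (if PySem.Chars.endswith cand.toList ['9'] then 0 else 1, cand.toList.length, cand)
          match m.get? k3 with
          | none => m.insert k3 (p, desc)
          | some cur => if pvPrioLt p cur.1 then m.insert k3 (p, desc) else m) PySem.Dict.empty
      = (pairs.filterMap (pvEntry digits_only)).foldl pvDStep PySem.Dict.empty := by
    rw [← pvFoldl_entry]
    refine List.foldl_ext _ _ _ ?_
    intro m cd _
    simp only [pvEntry, pvDStep, pvKey, pvPrio]
    split_ifs <;> rfl
  show ((pairs.foldl _ PySem.Dict.empty :
      PySem.Dict String ((Nat × Nat × String) × String)).items.map (fun kv => (kv.1, kv.2.2))) = _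
  rw [hb, pvBestB_items, List.map_map]
  rfl

theorem category_map_from_pairs_py_spec : Claim_equal_category_map_from_pairs_py := by
  intro pairs digits_only _
  unfold Spec_category_map_from_pairs_py
  rw [pvA_char, pvB_char]
  refine List.map_congr_left ?_
  intro k hk
  obtain ⟨e0, he0, hke0⟩ := List.mem_map.1 ((PySem.Set.mem_ofList _ _).1 hk)
  have hne : (pairs.filterMap (pvEntry digits_only)).filter (fun e' => pvKey e'.1 == k) ≠ [] := by
    intro hnil
    have := List.filter_eq_nil_iff.1 hnil e0 he0
    simp [hke0] at this
  rw [pvPerKey _ hne]
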